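-- pv_equiv track=rewrite | github.com/sasolanki03/ElevateLab-Project | password_tool.py | generate_leetspeak
-- ===== SOURCE A (Python) =====
-- def generate_leetspeak(word):
--     """
--     Generates common leetspeak variations of a given word.
--     """
--     leetspeak_map = {
--         'a': ['4', '@'], 'e': ['3'], 'i': ['1', '!'], 'o': ['0'],
--         's': ['5', '$'], 't': ['7', '+'], 'l': ['1'], 'g': ['9'],
--         'b': ['8'], 'z': ['2']
--     }
--     variations = ['']
--     for char in word.lower():
--         if char in leetspeak_map:
--             new_variations = []
--             for var in variations:
--                 for replacement in leetspeak_map[char]: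
--                     new_variations.append(var + replacement)
--             variations = new_variations
--         else:
--             variations = [v + char for v in variations]
--     return set(variations)
-- ===== SOURCE B (Python) =====
-- def generate_leetspeak(word):
--     """
--     Generates common leetspeak variations of a given word.
--     """
--     leetspeak_map = {
--         'a': ['4', '@'], 'e': ['3'], 'i': ['1', '!'], 'o': ['0'],
--         's': ['5', '$'], 't': ['7', '+'], 'l': ['1'], 'g': ['9'],
--         'b': ['8'], 'z': ['2']
--     }
--
--     def expand(chars):
--         # recursion on the suffix: all variations of chars, suffixes shared
--         if not chars:
--             return ['']
--         rest = expand(chars[1:])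
--         options = leetspeak_map.get(chars[0], [chars[0]])
--         return [r + suffix for r in options for suffix in rest]
--
--     return set(expand(list(word.lower())))
-- ===== Notes on version B (the rewrite author's own statement) =====
-- stated objective: simpler
-- what changed: Replaces A's iterative fold that rebuilds the whole prefix-variation list at every character (with an explicit membership branch and nested append loops) by a structural recursion on the character list that computes option lists via dict.get with a default and forms the suffix product once per level, sharing suffix lists.
import Mathlib
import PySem

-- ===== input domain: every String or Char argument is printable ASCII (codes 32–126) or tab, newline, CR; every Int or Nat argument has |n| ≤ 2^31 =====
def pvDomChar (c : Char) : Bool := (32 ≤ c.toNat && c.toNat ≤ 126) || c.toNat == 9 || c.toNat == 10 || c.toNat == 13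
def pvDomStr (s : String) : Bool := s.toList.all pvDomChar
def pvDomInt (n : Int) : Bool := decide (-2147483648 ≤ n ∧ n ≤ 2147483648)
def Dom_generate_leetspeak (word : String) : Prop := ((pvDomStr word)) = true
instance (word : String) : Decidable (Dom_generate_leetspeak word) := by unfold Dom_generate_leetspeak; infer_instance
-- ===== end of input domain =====

-- B replaces A's iterative prefix fold by a structural recursion taking the suffix product; simpler decomposition, same set.

-- the literal leetspeak_map, shared verbatim by both Pythons
def leetMap : PySem.Dict Char (List String) :=
  PySem.Dict.ofList [('a', ["4", "@"]), ('e', ["3"]), ('i', ["1", "!"]), ('o', ["0"]),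
    ('s', ["5", "$"]), ('t', ["7", "+"]), ('l', ["1"]), ('g', ["9"]),
    ('b', ["8"]), ('z', ["2"])]

-- ===== PORT A =====
def generate_leetspeak (word : String) : List String :=
  let variations :=
    (PySem.Str.lower word).toList.foldl
      (fun variations c =>
        if leetMap.contains c then
          variations.foldl
            (fun new_variations var =>
              (leetMap.getD c []).foldl
                (fun new_variations replacement => new_variations ++ [var ++ replacement])
                new_variations)
            []
        else
          variations.map (fun v => v ++ String.singleton c))
      [""]
  PySem.Set.ofList variations

-- ===== PORT B =====
def leetOptions (c : Char) : List String :=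
  (leetMap.get? c).getD [String.singleton c]

def leetExpand : List Char → List String
  | [] => [""]
  | c :: cs => (leetOptions c).flatMap (fun r => (leetExpand cs).map (fun suffix => r ++ suffix))

def generate_leetspeak_alt (word : String) : List String :=
  PySem.Set.ofList (leetExpand (PySem.Str.lower word).toList)

-- ===== PRECONDITION & SPEC =====
def Spec_generate_leetspeak (word : String) (out : List String) : Prop := out = generate_leetspeak_alt word
instance (word : String) (out : List String) : Decidable (Spec_generate_leetspeak word out) := by unfold Spec_generate_leetspeak; infer_instance

-- ===== CLAIM (what is proved, stated in full; the proofs are below) =====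
def Claim_equal_generate_leetspeak : Prop := ∀ (word : String), Dom_generate_leetspeak word → Spec_generate_leetspeak word (generate_leetspeak word)

-- ===== LEMMAS AND PROOFS =====

theorem flatMap_single_eq_map {α β : Type} (f : α → β) (l : List α) :
    l.flatMap (fun x => [f x]) = l.map f := by
  induction l with
  | nil => rfl
  | cons x xs ih => simp [List.flatMap] at ih ⊢; exact ih

-- A's per-character step equals a flatMap over B's option list
theorem leet_step_eq (vs : List String) (c : Char) :
    (if leetMap.contains c then
        vs.foldl
          (fun nv var => (leetMap.getD c []).foldl (fun nv r => nv ++ [var ++ r]) nv) []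
      else vs.map (fun v => v ++ String.singleton c))
      = vs.flatMap (fun v => (leetOptions c).map (fun r => v ++ r)) := by
  by_cases h : leetMap.contains c = true
  · simp only [h, if_pos]
    have hs : ∃ L, leetMap.get? c = some L := by
      have := PySem.Dict.contains_eq_isSome_get? (d := leetMap) (k := c)
      rw [h] at this
      exact Option.isSome_iff_exists.mp this.symm
    obtain ⟨L, hL⟩ := hs
    have hopt : leetOptions c = L := by simp [leetOptions, hL]
    have hgetD : leetMap.getD c [] = L := by simp [PySem.Dict.getD_eq_get?_getD, hL]
    rw [hopt, hgetD]
    have hf : (fun (nv : List String) (var : String) =>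
          L.foldl (fun nv r => nv ++ [var ++ r]) nv)
        = fun nv var => nv ++ L.map (fun r => var ++ r) := by
      funext nv var
      exact PySem.List.foldl_append_singleton_eq_map _ L nv
    rw [hf, PySem.List.foldl_append_eq_flatMap _ vs [], List.nil_append]
  · simp only [Bool.not_eq_true] at h
    have hn : leetMap.get? c = none := by
      have := PySem.Dict.contains_eq_isSome_get? (d := leetMap) (k := c)
      rw [h] at this
      exact Option.not_isSome_iff_eq_none.mp (by rw [← this]; simp)
    have hopt : leetOptions c = [String.singleton c] := by simp [leetOptions, hn]
    rw [hopt]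
    simp only [h, Bool.false_eq_true, if_false, List.map_cons, List.map_nil]
    rw [flatMap_single_eq_map]

-- the main invariant: A's fold from any prefix list equals prefixes ⧺ B's suffix expansion
theorem leet_fold_eq (cs : List Char) (vs : List String) :
    cs.foldl
      (fun variations c =>
        if leetMap.contains c then
          variations.foldl
            (fun nv var => (leetMap.getD c []).foldl (fun nv r => nv ++ [var ++ r]) nv) []
        else variations.map (fun v => v ++ String.singleton c))
      vs
    = vs.flatMap (fun v => (leetExpand cs).map (fun s => v ++ s)) := by
  induction cs generalizing vs with
  | nil =>
    rw [leetExpand]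
    simp
  | cons c cs ih =>
    rw [List.foldl_cons, ih, leet_step_eq, List.flatMap_assoc]
    simp only [leetExpand, List.map_flatMap]
    simp [List.flatMap_map, Function.comp_def, String.append_assoc]

-- ===== VERDICT (by name: the statement is the Claim_ definition above) =====
theorem generate_leetspeak_spec : Claim_equal_generate_leetspeak := by
  intro word _
  unfold Spec_generate_leetspeak generate_leetspeak generate_leetspeak_alt
  rw [leet_fold_eq]
  simp
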